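-- pv_equiv track=rewrite | github.com/dmackinnon1/portia | build/portia.py | belliniCellini1
-- ===== SOURCE A (Python) =====
-- def caskets(n):
--     return [i+1 for i in range(n)]
--
-- def belliniCellini1(n):
--     c = caskets(n)
--     result = []
--     cp = c[1:len(c)]
--     for j in cp:
--         result.append([j])
--     for i in cp:
--         remainders = c[:]
--         newResult = []
--         for k in result:
--             remainderk = removeAll(remainders,k)
--             remainderk = removeIfPresent(remainderk, i)
--             if len(remainderk) == 0:
--                 newResult.append(k)
--             for r in remainderk:
--                 p = k[:]
--                 p.append(r)
--                 newResult.append(p)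
--         result = newResult[:]
--     final = []
--     for i in result:
--         if len(i) == n:
--             final.append(i)
--     return final
--
-- def removeAll(p,d):
--     q = p[:]
--     for i in d:
--         removeIfPresent(q,i)
--     return q
--
-- def removeIfPresent(p,i):
--     if i in p: p.remove(i)
--     return p
-- ===== SOURCE B (Python) =====
-- def belliniCellini1(n):
--     # DFS: directly generate the derangement-style sequences in lexicographic
--     # order, position by position, instead of A's level-by-level BFS rebuild.
--     if n <= 0:
--         return []
--     def build(pos, avail):
--         if not avail:
--             return [[]]
--         return [[v] + rest
--                 for v in avail if v != pos
--                 for rest in build(pos + 1, [w for w in avail if w != v])]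
--     return build(1, list(range(1, n + 1)))
-- ===== Notes on version B (the rewrite author's own statement) =====
-- stated objective: simpler
-- what changed: Replaces A's BFS level-by-level rebuild (re-deriving each prefix's remaining values with removeAll/removeIfPresent every round and filtering full-length sequences at the end) by a short recursive DFS that extends a prefix position by position with the still-unused values allowed there, emitting the same sequences in the same lexicographic order.
import Mathlib
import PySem

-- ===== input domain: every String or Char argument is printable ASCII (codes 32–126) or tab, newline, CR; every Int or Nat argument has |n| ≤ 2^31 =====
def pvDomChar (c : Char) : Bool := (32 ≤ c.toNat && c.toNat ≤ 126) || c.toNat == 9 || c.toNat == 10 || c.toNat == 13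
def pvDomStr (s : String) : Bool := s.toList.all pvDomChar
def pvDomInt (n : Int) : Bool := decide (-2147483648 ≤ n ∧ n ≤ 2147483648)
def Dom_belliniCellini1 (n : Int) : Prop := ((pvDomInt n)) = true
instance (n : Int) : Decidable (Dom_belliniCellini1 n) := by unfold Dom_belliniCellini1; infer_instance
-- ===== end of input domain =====

-- B replaces A's BFS level-by-level rebuild by a recursive DFS that extends a prefix
-- position by position with the still-unused values allowed there (objective: simpler).

-- ===== PORT A =====
def pvCaskets (n : Int) : List Int := (PySem.List.pyRange 0 n 1).map (fun i => i + 1)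

def pvRemoveIfPresent (p : List Int) (i : Int) : List Int :=
  if i ∈ p then (PySem.List.remove? p i).getD p else p

def pvRemoveAll (p : List Int) (d : List Int) : List Int :=
  d.foldl (fun q i => pvRemoveIfPresent q i) p

def belliniCellini1 (n : Int) : List (List Int) :=
  let c := pvCaskets n
  let result : List (List Int) := []
  let cp := PySem.List.slice c (some 1) (some (c.length : Int))
  let result := cp.foldl (fun acc j => acc ++ [[j]]) result
  let result := cp.foldl (fun result i =>
    result.foldl (fun newResult k =>
      let remainderk := pvRemoveAll c k
      let remainderk := pvRemoveIfPresent remainderk i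
      let newResult := if remainderk.length = 0 then newResult ++ [k] else newResult
      remainderk.foldl (fun acc r => acc ++ [k ++ [r]]) newResult) []) result
  result.foldl (fun final i => if (i.length : Int) = n then final ++ [i] else final) []

-- ===== PORT B =====
def pvBuild (pos : Int) (avail : List Int) : List (List Int) :=
  if avail = [] then [[]]
  else avail.attach.flatMap (fun v =>
    if v.1 ≠ pos then
      (pvBuild (pos + 1) (avail.filter (fun w => w ≠ v.1))).map (fun rest => v.1 :: rest)
    else [])
termination_by avail.length
decreasing_by
  simp only [List.length_unattach]
  rw [← List.length_attach (l := avail)]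
  apply List.length_filter_lt_length_iff_exists.mpr
  exact ⟨v, List.mem_attach _ _, by simp⟩

def belliniCellini1_alt (n : Int) : List (List Int) :=
  if n ≤ 0 then [] else pvBuild 1 (PySem.List.pyRange 1 (n + 1) 1)

-- ===== PRECONDITION & SPEC =====
def Spec_belliniCellini1 (n : Int) (out : List (List Int)) : Prop := out = belliniCellini1_alt n
instance (n : Int) (out : List (List Int)) : Decidable (Spec_belliniCellini1 n out) := by unfold Spec_belliniCellini1; infer_instance

-- ===== CLAIM (what is proved, stated in full; the proofs are below) =====
def Claim_equal_belliniCellini1 : Prop := ∀ (n : Int), Dom_belliniCellini1 n → Spec_belliniCellini1 n (belliniCellini1 n)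

-- ===== LEMMAS AND PROOFS =====

-- the caskets [1..nn] as a pyRange, for a Nat size
def pvC (nn : Nat) : List Int := PySem.List.pyRange 1 ((nn : Int) + 1) 1

-- per-element contribution of one BFS round of A
def pvContrib (c : List Int) (i : Int) (k : List Int) : List (List Int) :=
  let rk := pvRemoveIfPresent (pvRemoveAll c k) i
  if rk = [] then [k] else rk.map (fun r => k ++ [r])

-- one BFS round of A, exactly as written in the port
def pvStep (c : List Int) (i : Int) (R : List (List Int)) : List (List Int) :=
  R.foldl (fun newResult k =>
    let remainderk := pvRemoveAll c k
    let remainderk := pvRemoveIfPresent remainderk i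
    let newResult := if remainderk.length = 0 then newResult ++ [k] else newResult
    remainderk.foldl (fun acc r => acc ++ [k ++ [r]]) newResult) []

lemma pvC_nodup (nn : Nat) : (pvC nn).Nodup := PySem.List.nodup_pyRange_one 1 ((nn : Int) + 1)

lemma pvC_mem (nn : Nat) (x : Int) : x ∈ pvC nn ↔ 1 ≤ x ∧ x < (nn : Int) + 1 :=
  PySem.List.mem_pyRange_one

lemma pvC_length (nn : Nat) : (pvC nn).length = nn := by
  simp [pvC, PySem.List.length_pyRange_one]

lemma pvRip_eq_filter (p : List Int) (i : Int) (hp : p.Nodup) :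
    pvRemoveIfPresent p i = p.filter (fun x => x ≠ i) := by
  unfold pvRemoveIfPresent
  by_cases h : i ∈ p
  · rw [if_pos h, PySem.List.remove?_eq_some_erase (xs := p) (v := i) h, Option.getD_some,
      hp.erase_eq_filter i]
    apply List.filter_congr
    intro x _
    by_cases hxi : x = i <;> simp [hxi]
  · rw [if_neg h, Eq.comm, List.filter_eq_self]
    intro x hx
    simp only [decide_eq_true_eq]
    exact fun hxi => h (hxi ▸ hx)

lemma pvRall_eq_filter (c : List Int) (k : List Int) (hc : c.Nodup) :
    pvRemoveAll c k = c.filter (fun x => x ∉ k) := by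
  induction k generalizing c with
  | nil => simp [pvRemoveAll]
  | cons a t ih =>
    have h1 : pvRemoveAll c (a :: t) = pvRemoveAll (pvRemoveIfPresent c a) t := rfl
    rw [h1, pvRip_eq_filter c a hc, ih _ (hc.filter _), List.filter_filter]
    apply List.filter_congr
    intro x _
    by_cases h1 : x = a <;> by_cases h2 : x ∈ t <;> simp [h1, h2]

lemma pvStep_eq_flatMap (c : List Int) (i : Int) (R : List (List Int)) :
    pvStep c i R = R.flatMap (pvContrib c i) := by
  unfold pvStep
  have hbody : (fun (newResult : List (List Int)) (k : List Int) =>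
      let remainderk := pvRemoveAll c k
      let remainderk := pvRemoveIfPresent remainderk i
      let newResult := if remainderk.length = 0 then newResult ++ [k] else newResult
      remainderk.foldl (fun acc r => acc ++ [k ++ [r]]) newResult)
      = fun acc k => acc ++ pvContrib c i k := by
    funext acc k
    show (let rk := pvRemoveIfPresent (pvRemoveAll c k) i;
      rk.foldl (fun a r => a ++ [k ++ [r]]) (if rk.length = 0 then acc ++ [k] else acc))
      = acc ++ pvContrib c i k
    unfold pvContrib
    by_cases h : pvRemoveIfPresent (pvRemoveAll c k) i = []
    · simp [h]
    · rw [PySem.List.foldl_append_singleton_eq_map]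
      simp [h, List.length_eq_zero_iff]
  rw [hbody, PySem.List.foldl_append_eq_flatMap, List.nil_append]

lemma pvBuild_ne_nil (pos : Int) (avail : List Int) (h : avail ≠ []) :
    pvBuild pos avail = avail.flatMap (fun v =>
      if v ≠ pos then
        (pvBuild (pos + 1) (avail.filter (fun w => w ≠ v))).map (fun rest => v :: rest)
      else []) := by
  rw [pvBuild, if_neg h]
  simp only [List.flatMap_def]
  apply congrArg List.flatten
  exact List.attach_map_val (f := fun v => if v ≠ pos then
    (pvBuild (pos + 1) (avail.filter (fun w => w ≠ v))).map (fun rest => v :: rest) else [])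

lemma pvFlatMap_filter (l : List Int) (p : Int → Bool) (f : Int → List (List Int)) :
    (l.filter p).flatMap f = l.flatMap (fun v => if p v then f v else []) := by
  induction l with
  | nil => rfl
  | cons a t ih =>
    by_cases h : p a <;> simp [h, ih]

-- a nodup list inside pvC nn has length at most nn
lemma pvLen_le (nn : Nat) (l : List Int) (hl : l.Nodup) (hsub : l ⊆ pvC nn) : l.length ≤ nn := by
  have := (hl.subperm hsub).length_le
  rwa [pvC_length] at this

-- with at least two values of c unused, removing one value cannot empty the remainder
lemma pvNotStuck (nn : Nat) (k : List Int) (i : Int) (hk : k.Nodup)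
    (hsub : ∀ x ∈ k, x ∈ pvC nn) (hlen : k.length + 2 ≤ nn) :
    ((pvC nn).filter (fun x => x ∉ k)).filter (fun x => x ≠ i) ≠ [] := by
  intro he
  have hsub2 : pvC nn ⊆ i :: k := by
    intro x hx
    by_cases hxk : x ∈ k
    · exact List.mem_cons_of_mem _ hxk
    by_cases hxi : x = i
    · exact hxi ▸ List.mem_cons_self
    exfalso
    have hmem : x ∈ ((pvC nn).filter (fun x => x ∉ k)).filter (fun x => x ≠ i) := by
      simp [List.mem_filter, hx, hxk, hxi]
    rw [he] at hmem
    exact absurd hmem (List.not_mem_nil)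
  have := pvLen_le nn (pvC nn) (pvC_nodup nn) (fun x hx => hx)
  have h2 := ((pvC_nodup nn).subperm hsub2).length_le
  rw [pvC_length] at h2
  simp only [List.length_cons] at h2
  omega

-- with exactly one value of c unused, the remainder is a singleton
lemma pvSingleton (nn : Nat) (k : List Int) (hk : k.Nodup)
    (hsub : ∀ x ∈ k, x ∈ pvC nn) (hlen : k.length + 1 = nn) :
    ∃ x, (pvC nn).filter (fun x => x ∉ k) = [x] := by
  have key : ∀ y, y ∈ (pvC nn).filter (fun x => x ∉ k) →
      ∀ z, z ∈ (pvC nn).filter (fun x => x ∉ k) → y = z := by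
    intro y hy z hz
    rw [List.mem_filter] at hy hz
    obtain ⟨hyc, hyk⟩ := hy
    obtain ⟨hzc, hzk⟩ := hz
    simp only [decide_eq_true_eq] at hyk hzk
    by_contra hne
    have hnd : (y :: z :: k).Nodup := by
      simp [List.nodup_cons, hyk, hzk, hk, hne]
    have hsub2 : (y :: z :: k) ⊆ pvC nn := by
      intro x hx
      simp only [List.mem_cons] at hx
      rcases hx with rfl | rfl | h
      · exact hyc
      · exact hzc
      · exact hsub x h
    have := pvLen_le nn _ hnd hsub2
    simp only [List.length_cons] at this
    omega
  have hne : (pvC nn).filter (fun x => x ∉ k) ≠ [] := by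
    intro he
    have hsub2 : pvC nn ⊆ k := by
      intro x hx
      by_contra hxk
      have hmem : x ∈ (pvC nn).filter (fun x => x ∉ k) := by
        simp [List.mem_filter, hx, hxk]
      rw [he] at hmem
      exact absurd hmem (List.not_mem_nil)
    have h2 := ((pvC_nodup nn).subperm hsub2).length_le
    rw [pvC_length] at h2
    have := pvLen_le nn k hk (fun x hx => hsub x hx)
    omega
  rcases hfk : (pvC nn).filter (fun x => x ∉ k) with _ | ⟨x, t⟩
  · exact absurd hfk hne
  rcases t with _ | ⟨y, t'⟩
  · exact ⟨x, rfl⟩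
  · exfalso
    have hx : x ∈ (pvC nn).filter (fun x => x ∉ k) := by rw [hfk]; simp
    have hy : y ∈ (pvC nn).filter (fun x => x ∉ k) := by rw [hfk]; simp
    have hxy : x = y := key x hx y hy
    have hnd := (pvC_nodup nn).filter (fun x => decide (x ∉ k))
    rw [hfk] at hnd
    simp [List.nodup_cons, hxy] at hnd

-- main correspondence: the remaining BFS rounds followed by the final length filter
-- produce, for each surviving prefix, exactly the DFS completions of that prefix
lemma pvMain (nn : Nat) (h1 : 1 ≤ nn) : ∀ (m : Nat), m < nn → ∀ R : List (List Int),
    (∀ k ∈ R, k.Nodup ∧ (∀ x ∈ k, x ∈ pvC nn) ∧ k.length + m + 1 = nn) →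
    ((PySem.List.pyRange ((nn : Int) - m) ((nn : Int) + 1) 1).foldl
        (fun R i => pvStep (pvC nn) i R) R).filter
        (fun k => decide ((k.length : Int) = (nn : Int)))
    = R.flatMap (fun k =>
        (pvBuild ((nn : Int) - m) ((pvC nn).filter (fun x => x ∉ k))).map
          (fun rest => k ++ rest)) := by
  intro m
  induction m with
  | zero =>
    intro _ R hR
    simp only [Nat.cast_zero, sub_zero]
    rw [show PySem.List.pyRange (nn : Int) ((nn : Int) + 1) 1 = [(nn : Int)] from
      PySem.List.pyRange_one_singleton _]
    simp only [List.foldl_cons, List.foldl_nil]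
    rw [pvStep_eq_flatMap, List.filter_flatMap]
    apply List.flatMap_congr
    intro k hkR
    obtain ⟨hnd, hsub, hlen⟩ := hR k hkR
    obtain ⟨x, hx⟩ := pvSingleton nn k hnd hsub (by omega)
    have hxc : x ∈ pvC nn := by
      have : x ∈ (pvC nn).filter (fun x => x ∉ k) := by rw [hx]; simp
      exact (List.mem_filter.mp this).1
    unfold pvContrib
    rw [pvRall_eq_filter _ _ (pvC_nodup nn),
      pvRip_eq_filter _ _ ((pvC_nodup nn).filter _), hx]
    have hb0 : pvBuild ((nn : Int) + 1) ([] : List Int) = [[]] := by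
      rw [pvBuild]; simp
    by_cases hxn : x = (nn : Int)
    · have hrk : [x].filter (fun y => y ≠ (nn : Int)) = [] := by simp [hxn]
      rw [hrk, pvBuild_ne_nil _ _ (List.cons_ne_nil x [])]
      simp [hxn]
      omega
    · have hrk : [x].filter (fun y => y ≠ (nn : Int)) = [x] := by simp [hxn]
      rw [hrk, pvBuild_ne_nil _ _ (List.cons_ne_nil x [])]
      simp [hxn, hb0]
      omega
  | succ m ih =>
    intro hm R hR
    have hcons : PySem.List.pyRange ((nn : Int) - (m + 1 : Nat)) ((nn : Int) + 1) 1
        = ((nn : Int) - (m + 1 : Nat)) :: PySem.List.pyRange ((nn : Int) - (m : Nat)) ((nn : Int) + 1) 1 := by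
      rw [PySem.List.pyRange_one_cons (by push_cast; omega)]
      congr 1
      push_cast
      ring
    rw [hcons, List.foldl_cons]
    set i : Int := (nn : Int) - (m + 1 : Nat) with hidef
    -- the round cannot get stuck here, so each prefix k turns into its one-step extensions
    have hcontrib : ∀ k ∈ R, pvContrib (pvC nn) i k =
        (((pvC nn).filter (fun x => x ∉ k)).filter (fun x => x ≠ i)).map (fun r => k ++ [r]) := by
      intro k hkR
      obtain ⟨hnd, hsub, hlen⟩ := hR k hkR
      unfold pvContrib
      rw [pvRall_eq_filter _ _ (pvC_nodup nn), pvRip_eq_filter _ _ ((pvC_nodup nn).filter _)]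
      rw [if_neg (pvNotStuck nn k i hnd hsub (by omega))]
    have hR' : ∀ k' ∈ pvStep (pvC nn) i R,
        k'.Nodup ∧ (∀ x ∈ k', x ∈ pvC nn) ∧ k'.length + m + 1 = nn := by
      intro k' hk'
      rw [pvStep_eq_flatMap, List.mem_flatMap] at hk'
      obtain ⟨k, hkR, hk'mem⟩ := hk'
      obtain ⟨hnd, hsub, hlen⟩ := hR k hkR
      rw [hcontrib k hkR, List.mem_map] at hk'mem
      obtain ⟨r, hr, rfl⟩ := hk'mem
      rw [List.mem_filter] at hr
      obtain ⟨hr1, hr2⟩ := hr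
      rw [List.mem_filter] at hr1
      obtain ⟨hrc, hrk⟩ := hr1
      simp only [decide_eq_true_eq] at hrk hr2
      refine ⟨?_, ?_, ?_⟩
      · simp [List.Nodup.append, hnd, hrk]
      · intro x hx
        rcases List.mem_append.mp hx with h | h
        · exact hsub x h
        · rw [List.mem_singleton] at h; exact h ▸ hrc
      · simp only [List.length_append, List.length_cons, List.length_nil]
        omega
    rw [ih (by omega) (pvStep (pvC nn) i R) hR']
    rw [pvStep_eq_flatMap, List.flatMap_assoc]
    apply List.flatMap_congr
    intro k hkR
    obtain ⟨hnd, hsub, hlen⟩ := hR k hkR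
    rw [hcontrib k hkR, List.flatMap_map, pvFlatMap_filter]
    have hfkne : (pvC nn).filter (fun x => x ∉ k) ≠ [] := by
      intro he
      have := pvNotStuck nn k i hnd hsub (by omega)
      rw [he] at this
      exact this rfl
    rw [pvBuild_ne_nil i _ hfkne, List.map_flatMap]
    apply List.flatMap_congr
    intro v hv
    have hvc : v ∈ pvC nn := (List.mem_filter.mp hv).1
    have hvk : v ∉ k := by
      have := (List.mem_filter.mp hv).2
      simpa using this
    by_cases hvi : v = i
    · simp [hvi]
    · rw [if_pos (by simpa using hvi), if_pos hvi]
      have harith : (nn : Int) - (m : Nat) = i + 1 := by rw [hidef]; push_cast; ring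
      have hfilt : (pvC nn).filter (fun x => x ∉ k ++ [v])
          = ((pvC nn).filter (fun x => x ∉ k)).filter (fun w => w ≠ v) := by
        rw [List.filter_filter]
        apply List.filter_congr
        intro x _
        by_cases h1 : x ∈ k <;> by_cases h2 : x = v <;> simp [h1, h2]
      rw [harith, hfilt, List.map_map]
      apply List.map_congr_left
      intro rest _
      simp
  -- end of induction

lemma pvCaskets_eq (nn : Nat) : pvCaskets ((nn : Nat) : Int) = pvC nn := by
  unfold pvCaskets pvC
  simp only [PySem.List.pyRange_one]
  rw [List.map_map]
  have h1 : ((nn : Int) - 0).toNat = nn := by omega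
  have h2 : ((nn : Int) + 1 - 1).toNat = nn := by omega
  rw [h1, h2]
  apply List.map_congr_left
  intro x _
  simp only [Function.comp_apply]
  omega

-- A's whole computation, written with the named round function and explicit filter
lemma pvA_eq (n : Int) : belliniCellini1 n =
    ((PySem.List.slice (pvCaskets n) (some 1) (some ((pvCaskets n).length : Int))).foldl
        (fun R i => pvStep (pvCaskets n) i R)
        ((PySem.List.slice (pvCaskets n) (some 1) (some ((pvCaskets n).length : Int))).map
          (fun j => [j]))).filter
      (fun k => decide ((k.length : Int) = n)) := by
  unfold belliniCellini1 pvStep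
  simp only [PySem.List.foldl_append_singleton_eq_map,
    PySem.List.foldl_append_ite_eq_filter, List.nil_append]

-- ===== VERDICT (by name: the statement is the Claim_ definition above) =====
theorem belliniCellini1_spec : Claim_equal_belliniCellini1 := by
  unfold Claim_equal_belliniCellini1 Spec_belliniCellini1
  intro n _
  by_cases hn0 : n ≤ 0
  · rw [pvA_eq, belliniCellini1_alt, if_pos hn0]
    unfold pvCaskets
    rw [PySem.List.pyRange_one_eq_nil hn0]
    simp [PySem.List.slice]
  · -- n ≥ 1
    rw [not_le] at hn0
    obtain ⟨nn, rfl⟩ : ∃ nn : Nat, n = (nn : Int) := ⟨n.toNat, by omega⟩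
    have hnn1 : 1 ≤ nn := by omega
    rcases Nat.lt_or_ge nn 2 with h2 | h2
    · -- nn = 1
      have hnn : nn = 1 := by omega
      subst hnn
      have hA : belliniCellini1 ((1 : Nat) : Int) = [] := by decide
      have hB : belliniCellini1_alt ((1 : Nat) : Int) = [] := by
        rw [belliniCellini1_alt, if_neg (by norm_num)]
        have hr : PySem.List.pyRange 1 (((1 : Nat) : Int) + 1) 1 = [1] := by decide
        rw [hr, pvBuild_ne_nil _ _ (by simp)]
        simp
      rw [hA, hB]
    · -- nn ≥ 2
      rw [pvA_eq, pvCaskets_eq]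
      have hlenC : ((pvC nn).length : Int) = ((nn : Nat) : Int) := by rw [pvC_length]
      have hslice : PySem.List.slice (pvC nn) (some 1) (some ((pvC nn).length : Int))
          = PySem.List.pyRange 2 ((nn : Int) + 1) 1 := by
        rw [show ((1 : Int)) = ((1 : Nat) : Int) from rfl,
          show ((pvC nn).length : Int) = (((pvC nn).length : Nat) : Int) from rfl,
          PySem.List.slice_natCast]
        have hc : pvC nn = 1 :: PySem.List.pyRange 2 ((nn : Int) + 1) 1 := by
          unfold pvC
          rw [PySem.List.pyRange_one_cons (by omega)]
          norm_num
        rw [pvC_length, hc]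
        simp only [List.drop_succ_cons, List.drop_zero]
        apply List.take_of_length_le
        rw [PySem.List.length_pyRange_one]
        omega
      rw [hslice]
      have hrange : PySem.List.pyRange 2 ((nn : Int) + 1) 1
          = PySem.List.pyRange ((nn : Int) - ((nn - 2 : Nat) : Int)) ((nn : Int) + 1) 1 := by
        congr 1
        push_cast [Nat.cast_sub h2]
        ring
      have hinv : ∀ k ∈ (PySem.List.pyRange 2 ((nn : Int) + 1) 1).map (fun j => [j]),
          k.Nodup ∧ (∀ x ∈ k, x ∈ pvC nn) ∧ k.length + (nn - 2) + 1 = nn := by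
        intro k hk
        rw [List.mem_map] at hk
        obtain ⟨j, hj, rfl⟩ := hk
        rw [PySem.List.mem_pyRange_one] at hj
        refine ⟨by simp, ?_, by simp; omega⟩
        intro x hx
        rw [List.mem_singleton] at hx
        subst hx
        rw [pvC_mem]
        constructor <;> omega
      rw [hrange] at hinv ⊢
      rw [pvMain nn hnn1 (nn - 2) (by omega) _ hinv]
      -- now the B side
      rw [belliniCellini1_alt, if_neg (by omega)]
      have hcB : PySem.List.pyRange 1 (((nn : Nat) : Int) + 1) 1 = pvC nn := rfl
      rw [hcB]
      have hcne : pvC nn ≠ [] := by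
        intro he
        have := congrArg List.length he
        rw [pvC_length] at this
        simp at this
        omega
      rw [pvBuild_ne_nil _ _ hcne]
      have hc : pvC nn = 1 :: PySem.List.pyRange 2 ((nn : Int) + 1) 1 := by
        unfold pvC
        rw [PySem.List.pyRange_one_cons (by omega)]
        norm_num
      conv_rhs => rw [hc]
      rw [List.flatMap_cons, if_neg (by simp), List.nil_append, List.flatMap_map]
      have harith2 : ((nn : Int) - ((nn - 2 : Nat) : Int)) = 2 := by
        push_cast [Nat.cast_sub h2]
        ring
      rw [harith2]
      apply List.flatMap_congr
      intro j hj
      rw [PySem.List.mem_pyRange_one] at hj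
      rw [if_pos (by omega)]
      have hfilt : (pvC nn).filter (fun x => x ∉ [j]) = (pvC nn).filter (fun w => w ≠ j) := by
        apply List.filter_congr
        intro x _
        rw [decide_eq_decide]
        simp
      rw [hfilt, show (1 : Int) + 1 = 2 from rfl, ← hc]
      apply List.map_congr_left
      intro rest _
      simp
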